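-- pv_equiv track=rewrite | github.com/hso8706/TIL-SAF | example_algorithm/daily_code/05_sum_of_repeat_number.py | sum_of_repeat_number
-- ===== SOURCE A (Python) =====
-- def sum_of_repeat_number(num_list):
--     num_dict = {}
--     sum_for_return = 0
--     for num in num_list:
--         if num in num_dict.keys():
--             num_dict[num] += 1
--         else:
--             num_dict[num] = 1
--
--     for key in num_dict.keys():
--         if num_dict[key] == 1:
--             sum_for_return += key
--
--     return sum_for_return
-- ===== SOURCE B (Python) =====
-- def sum_of_repeat_number(num_list):
--     counts = {}
--     total = 0
--     for num in num_list:
--         if num in counts: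
--             if counts[num] == 1:
--                 total -= num
--             counts[num] += 1
--         else:
--             counts[num] = 1
--             total += num
--     return total
-- ===== Notes on version B (the rewrite author's own statement) =====
-- stated objective: alternative
-- what changed: Single pass maintaining the running answer as an invariant alongside the counts (subtract a number when it is seen a second time), instead of building the full count table and then re-scanning its keys.
import Mathlib
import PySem

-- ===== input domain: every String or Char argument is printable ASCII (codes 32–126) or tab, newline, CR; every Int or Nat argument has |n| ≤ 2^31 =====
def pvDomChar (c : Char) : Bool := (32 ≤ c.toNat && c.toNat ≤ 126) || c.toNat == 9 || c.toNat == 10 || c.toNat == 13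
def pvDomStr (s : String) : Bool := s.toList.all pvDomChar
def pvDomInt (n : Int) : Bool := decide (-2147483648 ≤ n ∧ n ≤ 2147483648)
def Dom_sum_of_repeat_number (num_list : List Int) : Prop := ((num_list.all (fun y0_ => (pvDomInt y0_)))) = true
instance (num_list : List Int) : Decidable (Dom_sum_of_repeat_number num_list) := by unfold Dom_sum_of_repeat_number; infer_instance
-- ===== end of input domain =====

-- B computes the answer in one pass, maintaining the running sum as an invariant
-- alongside the counts, instead of building the count table and re-scanning its keys.


-- ===== PORT A =====
-- first loop of A: build the count dict
def buildCounts (num_list : List Int) : PySem.Dict Int Int :=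
  num_list.foldl (fun d num =>
    if d.contains num then d.insert num (d.getD num 0 + 1)   -- num_dict[num] += 1
    else d.insert num 1) PySem.Dict.empty                    -- num_dict[num] = 1

def sum_of_repeat_number (num_list : List Int) : Int :=
  let num_dict := buildCounts num_list
  -- second loop of A: sum the keys whose count is 1
  num_dict.keys.foldl (fun s key => if num_dict.getD key 0 = 1 then s + key else s) 0

-- ===== PORT B =====
-- one step of B's single loop: state = (counts, total)
def stepB (st : PySem.Dict Int Int × Int) (num : Int) : PySem.Dict Int Int × Int :=
  if st.1.contains num then
    (st.1.insert num (st.1.getD num 0 + 1),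
     if st.1.getD num 0 = 1 then st.2 - num else st.2)
  else
    (st.1.insert num 1, st.2 + num)

def sum_of_repeat_number_alt (num_list : List Int) : Int :=
  (num_list.foldl stepB (PySem.Dict.empty, 0)).2

-- ===== PRECONDITION & SPEC =====
def Spec_sum_of_repeat_number (num_list : List Int) (out : Int) : Prop := out = sum_of_repeat_number_alt num_list
instance (num_list : List Int) (out : Int) : Decidable (Spec_sum_of_repeat_number num_list out) := by unfold Spec_sum_of_repeat_number; infer_instance

-- ===== CLAIM (what is proved, stated in full; the proofs are below) =====
def Claim_equal_sum_of_repeat_number : Prop := ∀ (num_list : List Int), Dom_sum_of_repeat_number num_list → Spec_sum_of_repeat_number num_list (sum_of_repeat_number num_list)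

-- ===== LEMMAS AND PROOFS =====

-- the common value: sum, over the distinct elements of p, of those occurring exactly once
def Ssum (p : List Int) : Int :=
  ((PySem.List.dedup p).map (fun k => if (p.count k : Int) = 1 then k else 0)).sum

-- A's build loop is the canonical counter loop
theorem buildCounts_eq_counter_aux (l : List Int) :
    ∀ d : PySem.Dict Int Int,
      l.foldl (fun d num =>
        if d.contains num then d.insert num (d.getD num 0 + 1)
        else d.insert num 1) d
      = l.foldl (fun d x => d.insert x (d.getD x 0 + 1)) d := by
  induction l with
  | nil => intro d; rfl
  | cons x t ih =>
    intro d
    simp only [List.foldl_cons]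
    by_cases h : d.contains x = true
    · rw [if_pos h, ih]
    · rw [if_neg h, PySem.Dict.getD_of_not_contains d 0 (by simpa using h), ih]
      norm_num

theorem buildCounts_eq_counter (l : List Int) :
    buildCounts l = PySem.Dict.counter l := by
  rw [buildCounts, buildCounts_eq_counter_aux, PySem.Dict.foldl_insert_getD_add_one_eq_counter]

-- a conditional-accumulation foldl is an initial value plus a sum of a map
theorem foldl_if_eq_sum (c : Int → Prop) [DecidablePred c] (l : List Int) :
    ∀ s : Int, l.foldl (fun s k => if c k then s + k else s) s
      = s + (l.map (fun k => if c k then k else 0)).sum := by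
  induction l with
  | nil => intro s; simp
  | cons x t ih =>
    intro s
    simp only [List.foldl_cons, List.map_cons, List.sum_cons, ih]
    by_cases h : c x
    · simp [h]; ring
    · simp [h]

-- sums of two maps that agree everywhere except at one element of a Nodup list
theorem map_sum_diff (l : List Int) (f g : Int → Int) (x : Int) :
    l.Nodup → x ∈ l → (∀ k ∈ l, k ≠ x → f k = g k) →
      (l.map g).sum = (l.map f).sum - f x + g x := by
  induction l with
  | nil => intro _ hx; cases hx
  | cons a t ih =>
    intro hnd hx hfg
    simp only [List.map_cons, List.sum_cons]
    rcases List.mem_cons.mp hx with rfl | hxt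
    · have hxt : x ∉ t := (List.nodup_cons.mp hnd).1
      have : t.map g = t.map f := by
        apply List.map_congr_left
        intro k hk
        exact (hfg k (List.mem_cons_of_mem _ hk) (fun h => hxt (h ▸ hk))).symm
      rw [this]; ring
    · have ha : a ≠ x := fun h => (List.nodup_cons.mp hnd).1 (h ▸ hxt)
      rw [hfg a (List.mem_cons_self) ha,
          ih (List.nodup_cons.mp hnd).2 hxt
            (fun k hk => hfg k (List.mem_cons_of_mem _ hk))]
      ring

theorem dedup_append_singleton (p : List Int) (x : Int) :
    PySem.List.dedup (p ++ [x])
      = if x ∈ p then PySem.List.dedup p else PySem.List.dedup p ++ [x] := by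
  have h1 : PySem.Set.ofList (p ++ [x]) = (PySem.Set.ofList p).add x := by
    simp [PySem.Set.ofList, List.foldl_append]
  by_cases h : x ∈ p
  · have hm : x ∈ PySem.Set.ofList p := (PySem.Set.mem_ofList p x).mpr h
    simp [PySem.List.dedup, h1, PySem.Set.add, hm, h]
  · have hm : x ∉ PySem.Set.ofList p := fun hm => h ((PySem.Set.mem_ofList p x).mp hm)
    simp [PySem.List.dedup, h1, PySem.Set.add, hm, h]

theorem Ssum_snoc (p : List Int) (x : Int) :
    Ssum (p ++ [x])
      = if x ∈ p then (if (p.count x : Int) = 1 then Ssum p - x else Ssum p)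
        else Ssum p + x := by
  unfold Ssum
  rw [dedup_append_singleton]
  by_cases h : x ∈ p
  · rw [if_pos h, if_pos h]
    rw [map_sum_diff (PySem.List.dedup p)
        (fun k => if (p.count k : Int) = 1 then k else 0)
        (fun k => if ((p ++ [x]).count k : Int) = 1 then k else 0) x
        (PySem.Set.nodup_ofList p) ((PySem.Set.mem_ofList p x).mpr h)
        (by intro k _ hk; simp [List.count_append, Ne.symm hk])]
    have hc : ¬ (((p ++ [x]).count x : Int) = 1) := by
      have hpos := List.count_pos_iff.mpr h
      have h1 : List.count x [x] = 1 := by simp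
      simp only [List.count_append, h1]
      push_cast
      omega
    rw [if_neg hc]
    by_cases h1 : (p.count x : Int) = 1 <;> simp [h1]
  · rw [if_neg h, if_neg h]
    simp only [List.map_append, List.sum_append, List.map_cons, List.map_nil, List.sum_cons,
      List.sum_nil]
    have hmap : (PySem.List.dedup p).map (fun k => if ((p ++ [x]).count k : Int) = 1 then k else 0)
        = (PySem.List.dedup p).map (fun k => if (p.count k : Int) = 1 then k else 0) := by
      apply List.map_congr_left
      intro k hk
      have hk' : k ≠ x := fun he => h (he ▸ (PySem.Set.mem_ofList p k).mp hk)
      simp [List.count_append, Ne.symm hk']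
    have hx0 : p.count x = 0 := List.count_eq_zero.mpr h
    rw [hmap]
    simp [List.count_append, hx0]

-- the loop invariant of B: state after a prefix p is (counter p, Ssum p)
theorem stepB_inv (l : List Int) :
    ∀ p : List Int,
      l.foldl stepB (PySem.Dict.counter p, Ssum p)
        = (PySem.Dict.counter (p ++ l), Ssum (p ++ l)) := by
  induction l with
  | nil => intro p; simp
  | cons x t ih =>
    intro p
    have hstep : stepB (PySem.Dict.counter p, Ssum p) x
        = (PySem.Dict.counter (p ++ [x]), Ssum (p ++ [x])) := by
      unfold stepB
      rw [PySem.Dict.counter_append_singleton, PySem.Dict.modify, Ssum_snoc]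
      by_cases h : x ∈ p
      · rw [if_pos (by simp [PySem.Dict.contains_counter, h]), if_pos h]
        simp [PySem.Dict.getD_counter]
      · rw [if_neg (by simp [PySem.Dict.contains_counter, h]), if_neg h]
        have : p.count x = 0 := List.count_eq_zero.mpr h
        simp [PySem.Dict.getD_counter, this]
    calc (x :: t).foldl stepB (PySem.Dict.counter p, Ssum p)
        = t.foldl stepB (PySem.Dict.counter (p ++ [x]), Ssum (p ++ [x])) := by
          rw [List.foldl_cons, hstep]
      _ = (PySem.Dict.counter (p ++ x :: t), Ssum (p ++ x :: t)) := by
          rw [ih (p ++ [x])]; simp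

theorem A_eq_Ssum (num_list : List Int) :
    sum_of_repeat_number num_list = Ssum num_list := by
  unfold sum_of_repeat_number
  rw [buildCounts_eq_counter]
  simp only [PySem.Dict.keys_counter, PySem.Dict.getD_counter]
  rw [foldl_if_eq_sum (fun k => (num_list.count k : Int) = 1)]
  simp [Ssum, PySem.List.dedup]

theorem B_eq_Ssum (num_list : List Int) :
    sum_of_repeat_number_alt num_list = Ssum num_list := by
  unfold sum_of_repeat_number_alt
  have h0 : (PySem.Dict.empty, (0 : Int)) = (PySem.Dict.counter ([] : List Int), Ssum []) := rfl
  rw [h0, stepB_inv num_list []]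
  simp

-- ===== VERDICT (by name: the statement is the Claim_ definition above) =====
theorem sum_of_repeat_number_spec : Claim_equal_sum_of_repeat_number := by
  intro num_list _
  unfold Spec_sum_of_repeat_number
  rw [A_eq_Ssum, B_eq_Ssum]
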